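-- pv_equiv track=rewrite | github.com/maybeitsai/text-summarization-indobert | modules/extract.py | categorize_sentences
-- ===== SOURCE A (Python) =====
-- def categorize_sentences(segmented_texts):
--     """
--     Fungsi untuk mengkategorikan kalimat dalam dokumen ke dalam 'title', 'latar_belakang', 'tujuan', dan 'metode'.
--     """
--     categorized_texts = {}
--
--     for file_name, sentences in segmented_texts.items():
--         categorized_texts[file_name] = {
--             'title': [],
--             'latar_belakang': [],
--             'tujuan': [],
--             'metode': []
--         }
--
--         # State flags
--         in_latar_belakang = False
--         in_tujuan = False
--         in_metode = False
--
--         for i, sentence in enumerate(sentences):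
--             lower_sentence = sentence.lower()
--
--             # 1. Title: always the first sentence
--             if i == 0:
--                 categorized_texts[file_name]['title'].append(sentence)
--                 continue
--
--             # 2. Latar Belakang
--             if "latar belakang" in lower_sentence:
--                 in_latar_belakang = True
--
--             if in_latar_belakang:
--                 if any(kw in lower_sentence for kw in ["tujuan penelitian", "tujuan masalah", "batasan dan tujuan"]):
--                     in_latar_belakang = False
--                     in_tujuan = True
--                     categorized_texts[file_name]['tujuan'].append(sentence)
--                     continue  # Skip this sentence (boundary marker)
--
--                 categorized_texts[file_name]['latar_belakang'].append(sentence)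
--                 continue
--
--             # 3. Tujuan
--             if in_tujuan:
--                 if any(kw in lower_sentence for kw in ["metode penelitian", "metodologi"]):
--                     in_tujuan = False
--                     in_metode = True
--                     categorized_texts[file_name]['metode'].append(sentence)
--                     continue  # Skip this sentence (boundary marker)
--
--                 categorized_texts[file_name]['tujuan'].append(sentence)
--                 continue
--
--             # 4. Metode
--             if in_metode:
--                 categorized_texts[file_name]['metode'].append(sentence)
--                 continue
--
--     return categorized_texts
-- ===== SOURCE B (Python) =====
-- TUJUAN_KWS = ("tujuan penelitian", "tujuan masalah", "batasan dan tujuan")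
-- METODE_KWS = ("metode penelitian", "metodologi")
--
--
-- def _is_latar(low):
--     return "latar belakang" in low
--
--
-- def _is_tujuan(low):
--     return any(k in low for k in TUJUAN_KWS)
--
--
-- def _is_metode(low):
--     return any(k in low for k in METODE_KWS)
--
--
-- def categorize_sentences(segmented_texts):
--     """Segment-at-a-time version: jump to the next boundary keyword and
--     extend whole slices, instead of classifying sentence by sentence."""
--     result = {}
--     for file_name, ss in segmented_texts.items():
--         lows = [s.lower() for s in ss]
--         n = len(ss)
--
--         def find(pred, j):
--             while j < n and not pred(lows[j]):
--                 j += 1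
--             return j
--
--         latar, tujuan, metode = [], [], []
--         j, state = 1, 'start'
--         while j < n:
--             if state == 'start':
--                 j = find(_is_latar, j)
--                 state = 'latar'
--             elif state == 'latar':
--                 k = find(_is_tujuan, j)
--                 latar += ss[j:k]
--                 if k < n:
--                     tujuan.append(ss[k])
--                 j, state = k + 1, 'tujuan'
--             elif state == 'tujuan':
--                 k = find(lambda lo: _is_latar(lo) or _is_metode(lo), j)
--                 tujuan += ss[j:k]
--                 if k < n and _is_latar(lows[k]):
--                     j, state = k, 'latar'
--                 else:
--                     if k < n:
--                         metode.append(ss[k])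
--                     j, state = k + 1, 'metode'
--             else:  # metode
--                 k = find(_is_latar, j)
--                 metode += ss[j:k]
--                 j, state = k, 'latar'
--         result[file_name] = {
--             'title': ss[:1],
--             'latar_belakang': latar,
--             'tujuan': tujuan,
--             'metode': metode,
--         }
--     return result
-- ===== Notes on version B (the rewrite author's own statement) =====
-- stated objective: alternative
-- what changed: B replaces A's sentence-by-sentence loop with three boolean flags and per-sentence appends by a boundary-jumping segmenter: it repeatedly searches for the next boundary keyword index and extends each category with a whole slice at a time.
import Mathlib
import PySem

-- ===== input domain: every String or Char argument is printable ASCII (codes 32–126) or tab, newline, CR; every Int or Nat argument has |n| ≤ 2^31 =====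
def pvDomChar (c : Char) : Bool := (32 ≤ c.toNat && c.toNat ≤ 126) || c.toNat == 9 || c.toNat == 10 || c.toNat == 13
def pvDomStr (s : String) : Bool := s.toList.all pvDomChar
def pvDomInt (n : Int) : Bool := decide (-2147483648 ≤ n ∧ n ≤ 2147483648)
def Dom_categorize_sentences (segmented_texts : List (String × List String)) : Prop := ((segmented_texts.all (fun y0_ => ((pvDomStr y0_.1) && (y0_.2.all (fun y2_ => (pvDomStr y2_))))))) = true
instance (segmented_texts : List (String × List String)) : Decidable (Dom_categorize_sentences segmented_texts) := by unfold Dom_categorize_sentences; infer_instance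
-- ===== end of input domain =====

-- B replaces A's sentence-by-sentence three-flag loop by a boundary-jumping segmenter
-- (find the next keyword index, extend each category a whole slice at a time); objective: alternative, same cost.
-- The dict parameter is read through PySem.Dict.ofList (the Python argument IS a dict: duplicate keys collapse, first position / last value).

-- ===== PORT A =====
def pvTujuanKw (low : String) : Bool :=
  ["tujuan penelitian", "tujuan masalah", "batasan dan tujuan"].any (fun kw => PySem.Str.isIn kw low)
def pvMetodeKw (low : String) : Bool :=
  ["metode penelitian", "metodologi"].any (fun kw => PySem.Str.isIn kw low)

-- one iteration of A's `for i, sentence in enumerate(sentences)` loop: state = (in_latar, in_tujuan, in_metode) × (title, latar, tujuan, metode)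
def pvStepA (acc : (Bool × Bool × Bool) × (List String × List String × List String × List String))
    (p : Int × String) : (Bool × Bool × Bool) × (List String × List String × List String × List String) :=
  let inL := acc.1.1; let inT := acc.1.2.1; let inM := acc.1.2.2
  let t := acc.2.1; let l := acc.2.2.1; let u := acc.2.2.2.1; let m := acc.2.2.2.2
  let sentence := p.2
  let low := PySem.Str.lower sentence
  if p.1 == 0 then ((inL, inT, inM), (t ++ [sentence], l, u, m))
  else
    let inL := if PySem.Str.isIn "latar belakang" low then true else inL
    if inL then
      if pvTujuanKw low then ((false, true, inM), (t, l, u ++ [sentence], m))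
      else ((inL, inT, inM), (t, l ++ [sentence], u, m))
    else if inT then
      if pvMetodeKw low then ((inL, false, true), (t, l, u, m ++ [sentence]))
      else ((inL, inT, inM), (t, l, u ++ [sentence], m))
    else if inM then ((inL, inT, inM), (t, l, u, m ++ [sentence]))
    else ((inL, inT, inM), (t, l, u, m))

def pvFileA (sentences : List String) : List (String × List String) :=
  let r := (PySem.List.enumerate sentences 0).foldl pvStepA ((false, false, false), ([], [], [], []))
  [("title", r.2.1), ("latar_belakang", r.2.2.1), ("tujuan", r.2.2.2.1), ("metode", r.2.2.2.2)]

def categorize_sentences (segmented_texts : List (String × List String)) : List (String × List (String × List String)) :=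
  (PySem.Dict.ofList segmented_texts).items.map (fun p => (p.1, pvFileA p.2))

-- ===== PORT B =====
-- Source B's keyword predicates (_is_latar / _is_tujuan / _is_metode), on the pre-lowered string
def pvIsLatar (low : String) : Bool := PySem.Str.isIn "latar belakang" low
def pvIsTujuan (low : String) : Bool :=
  ["tujuan penelitian", "tujuan masalah", "batasan dan tujuan"].any (fun kw => PySem.Str.isIn kw low)
def pvIsMetode (low : String) : Bool :=
  ["metode penelitian", "metodologi"].any (fun kw => PySem.Str.isIn kw low)

-- Source B's Python state strings 'start'/'latar'/'tujuan'/'metode' rendered as an enum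
inductive PvSt
  | start | latar | tujuan | metode
deriving DecidableEq, Repr

-- Source B's inner `find(pred, j)` while-loop
def pvFindB (lows : List String) (p : String → Bool) (j : Nat) : Nat :=
  if _h : j < lows.length then
    if p (PySem.List.pyGetD lows (j : Int) "") then j else pvFindB lows p (j + 1)
  else j
termination_by lows.length - j

lemma pvFindB_ge (lows : List String) (p : String → Bool) (j : Nat) : j ≤ pvFindB lows p j := by
  unfold pvFindB
  split_ifs with h1 h2
  · exact le_rfl
  · exact le_trans (Nat.le_succ j) (pvFindB_ge lows p (j + 1))
  · exact le_rfl
termination_by lows.length - j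

-- Source B's outer `while j < n` loop over (j, state) with accumulators (latar, tujuan, metode)
def pvLoopB (ss lows : List String) (n : Nat) (j : Nat) (st : PvSt)
    (l t m : List String) : List String × List String × List String :=
  if j < n then
    match st with
    | PvSt.start => pvLoopB ss lows n (pvFindB lows pvIsLatar j) PvSt.latar l t m
    | PvSt.latar =>
        let k := pvFindB lows pvIsTujuan j
        let l' := l ++ PySem.List.slice ss (some (j : Int)) (some (k : Int))
        let t' := if k < n then t ++ [PySem.List.pyGetD ss (k : Int) ""] else t
        pvLoopB ss lows n (k + 1) PvSt.tujuan l' t' m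
    | PvSt.tujuan =>
        let k := pvFindB lows (fun lo => pvIsLatar lo || pvIsMetode lo) j
        let t' := t ++ PySem.List.slice ss (some (j : Int)) (some (k : Int))
        if k < n ∧ pvIsLatar (PySem.List.pyGetD lows (k : Int) "") then
          pvLoopB ss lows n k PvSt.latar l t' m
        else
          let m' := if k < n then m ++ [PySem.List.pyGetD ss (k : Int) ""] else m
          pvLoopB ss lows n (k + 1) PvSt.metode l t' m'
    | PvSt.metode =>
        let k := pvFindB lows pvIsLatar j
        let m' := m ++ PySem.List.slice ss (some (j : Int)) (some (k : Int))
        pvLoopB ss lows n k PvSt.latar l t m'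
  else (l, t, m)
termination_by 2 * (n + 1 - j) + (match st with | PvSt.latar => 0 | _ => 1)
decreasing_by
  · have := pvFindB_ge lows pvIsLatar j; omega
  · have := pvFindB_ge lows pvIsTujuan j; omega
  · have := pvFindB_ge lows (fun lo => pvIsLatar lo || pvIsMetode lo) j; omega
  · have := pvFindB_ge lows (fun lo => pvIsLatar lo || pvIsMetode lo) j; omega
  · have := pvFindB_ge lows pvIsLatar j; omega

def pvFileB (ss : List String) : List (String × List String) :=
  let lows := ss.map PySem.Str.lower
  let n := ss.length
  let r := pvLoopB ss lows n 1 PvSt.start [] [] []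
  [("title", PySem.List.slice ss none (some 1)),
   ("latar_belakang", r.1), ("tujuan", r.2.1), ("metode", r.2.2)]

def categorize_sentences_alt (segmented_texts : List (String × List String)) : List (String × List (String × List String)) :=
  (PySem.Dict.ofList segmented_texts).items.map (fun p => (p.1, pvFileB p.2))

-- ===== PRECONDITION & SPEC =====
def Spec_categorize_sentences (segmented_texts : List (String × List String)) (out : List (String × List (String × List String))) : Prop := out = categorize_sentences_alt segmented_texts
instance (segmented_texts : List (String × List String)) (out : List (String × List (String × List String))) : Decidable (Spec_categorize_sentences segmented_texts out) := by unfold Spec_categorize_sentences; infer_instance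

-- ===== CLAIM (what is proved, stated in full; the proofs are below) =====
def Claim_equal_categorize_sentences : Prop := ∀ (segmented_texts : List (String × List String)), Dom_categorize_sentences segmented_texts → Spec_categorize_sentences segmented_texts (categorize_sentences segmented_texts)

-- ===== LEMMAS AND PROOFS =====

-- the section state A's three (possibly stale, shadowed) flags encode: in_latar dominates, then in_tujuan, then in_metode
def pvStateOf : Bool × Bool × Bool → PvSt
  | (true, _, _) => PvSt.latar
  | (false, true, _) => PvSt.tujuan
  | (false, false, true) => PvSt.metode
  | (false, false, false) => PvSt.start

-- the pure per-sentence state transition both programs realise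
def pvNextState (st : PvSt) (low : String) : PvSt :=
  let st := if pvIsLatar low then PvSt.latar else st
  match st with
  | PvSt.latar => if pvIsTujuan low then PvSt.tujuan else PvSt.latar
  | PvSt.tujuan => if pvIsMetode low then PvSt.metode else PvSt.tujuan
  | s => s

-- reference semantics: sentence-wise categorisation from a given state (proof layer only)
def pvGo : PvSt → List String → List String × List String × List String
  | _, [] => ([], [], [])
  | st, s :: r =>
    match pvNextState st (PySem.Str.lower s) with
    | PvSt.start => pvGo PvSt.start r
    | PvSt.latar => let g := pvGo PvSt.latar r; (s :: g.1, g.2.1, g.2.2)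
    | PvSt.tujuan => let g := pvGo PvSt.tujuan r; (g.1, s :: g.2.1, g.2.2)
    | PvSt.metode => let g := pvGo PvSt.metode r; (g.1, g.2.1, s :: g.2.2)

lemma pvStepA_ne_zero (acc : (Bool × Bool × Bool) × (List String × List String × List String × List String))
    (p : Int × String) (h : p.1 ≠ 0) : pvStepA acc p = pvStepA acc (1, p.2) := by
  simp [pvStepA, h]

lemma pvStepA_fst (fl : Bool × Bool × Bool) (t l u m : List String) (x : String) :
    pvStateOf (pvStepA (fl, (t, l, u, m)) (1, x)).1 = pvNextState (pvStateOf fl) (PySem.Str.lower x) := by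
  obtain ⟨a, b, c⟩ := fl
  cases a <;> cases b <;> cases c <;>
    by_cases h1 : pvIsLatar (PySem.Str.lower x) <;>
      by_cases h2 : pvTujuanKw (PySem.Str.lower x) <;>
        by_cases h3 : pvMetodeKw (PySem.Str.lower x) <;>
          simp_all [pvStepA, pvNextState, pvStateOf, pvIsLatar, pvIsTujuan, pvIsMetode,
            pvTujuanKw, pvMetodeKw]

lemma pvStepA_snd (fl : Bool × Bool × Bool) (t l u m : List String) (x : String) :
    (pvStepA (fl, (t, l, u, m)) (1, x)).2 =
      (match pvNextState (pvStateOf fl) (PySem.Str.lower x) with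
        | PvSt.start => (t, l, u, m)
        | PvSt.latar => (t, l ++ [x], u, m)
        | PvSt.tujuan => (t, l, u ++ [x], m)
        | PvSt.metode => (t, l, u, m ++ [x])) := by
  obtain ⟨a, b, c⟩ := fl
  cases a <;> cases b <;> cases c <;>
    by_cases h1 : pvIsLatar (PySem.Str.lower x) <;>
      by_cases h2 : pvTujuanKw (PySem.Str.lower x) <;>
        by_cases h3 : pvMetodeKw (PySem.Str.lower x) <;>
          simp_all [pvStepA, pvNextState, pvStateOf, pvIsLatar, pvIsTujuan, pvIsMetode,
            pvTujuanKw, pvMetodeKw]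

-- A's fold computes pvGo from the state the flags encode
lemma pvFoldA_eq (xs : List String) (fl : Bool × Bool × Bool) (t l u m : List String) :
    (xs.foldl (fun acc s => pvStepA acc (1, s)) (fl, (t, l, u, m))).2 =
      (t, l ++ (pvGo (pvStateOf fl) xs).1,
          u ++ (pvGo (pvStateOf fl) xs).2.1,
          m ++ (pvGo (pvStateOf fl) xs).2.2) := by
  induction xs generalizing fl t l u m with
  | nil => simp [pvGo]
  | cons x r ih =>
    rw [List.foldl_cons]
    rcases hstep : pvStepA (fl, (t, l, u, m)) (1, x) with ⟨fl', t', l', u', m'⟩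
    have hfst : pvStateOf fl' = pvNextState (pvStateOf fl) (PySem.Str.lower x) := by
      have := pvStepA_fst fl t l u m x
      rwa [hstep] at this
    have hsnd : (t', l', u', m') =
        (match pvNextState (pvStateOf fl) (PySem.Str.lower x) with
          | PvSt.start => (t, l, u, m)
          | PvSt.latar => (t, l ++ [x], u, m)
          | PvSt.tujuan => (t, l, u ++ [x], m)
          | PvSt.metode => (t, l, u, m ++ [x])) := by
      have := pvStepA_snd fl t l u m x
      rwa [hstep] at this
    cases hc : pvNextState (pvStateOf fl) (PySem.Str.lower x) <;>
      rw [hc] at hfst hsnd <;>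
        simp only [Prod.mk.injEq] at hsnd <;>
          obtain ⟨rfl, rfl, rfl, rfl⟩ := hsnd <;>
            rw [ih fl', hfst] <;> simp [pvGo, hc]

-- ===== B side: the boundary-jump loop also computes pvGo =====

lemma pvFindB_spec (lows : List String) (p : String → Bool) (j : Nat) :
    (∀ i, j ≤ i → i < pvFindB lows p j → i < lows.length → p (lows.getD i "") = false) ∧
      (pvFindB lows p j < lows.length → p (lows.getD (pvFindB lows p j) "") = true) ∧
      pvFindB lows p j ≤ max j lows.length := by
  rw [pvFindB]
  split_ifs with h1 h2
  · refine ⟨fun i ha hb _ => by omega, fun _ => ?_, by omega⟩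
    simpa using h2
  · obtain ⟨ih1, ih2, ih3⟩ := pvFindB_spec lows p (j + 1)
    refine ⟨fun i hji hik hil => ?_, ih2, by omega⟩
    rcases Nat.eq_or_lt_of_le hji with rfl | hlt
    · simpa using h2
    · exact ih1 i hlt hik hil
  · exact ⟨fun i ha hb _ => by omega, fun h => absurd h (by omega), by omega⟩
termination_by lows.length - j

-- pvFindB on the lowered list, restated over ss
lemma pvFind_facts (ss : List String) (p : String → Bool) (j : Nat) :
    j ≤ pvFindB (ss.map PySem.Str.lower) p j ∧
      pvFindB (ss.map PySem.Str.lower) p j ≤ max j ss.length ∧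
      (∀ s ∈ (ss.drop j).take (pvFindB (ss.map PySem.Str.lower) p j - j), p (PySem.Str.lower s) = false) ∧
      (∀ h : pvFindB (ss.map PySem.Str.lower) p j < ss.length, p (PySem.Str.lower ss[pvFindB (ss.map PySem.Str.lower) p j]) = true) := by
  obtain ⟨h1, h2, h3⟩ := pvFindB_spec (ss.map PySem.Str.lower) p j
  simp only [List.length_map] at h1 h2 h3
  refine ⟨pvFindB_ge _ _ _, h3, fun s hs => ?_, fun h => ?_⟩
  · obtain ⟨idx, hidx, heq⟩ := List.getElem_of_mem hs
    have hlen := hidx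
    simp only [List.length_take, List.length_drop, lt_min_iff] at hlen
    have hidx' : j + idx < ss.length := by omega
    have : ((ss.drop j).take (pvFindB (ss.map PySem.Str.lower) p j - j))[idx] = ss[j + idx] := by
      rw [List.getElem_take, List.getElem_drop]
    rw [this] at heq
    have := h1 (j + idx) (by omega) (by omega) (by simpa using hidx')
    rw [List.getD, List.getElem?_map, List.getElem?_eq_getElem hidx'] at this
    simpa [heq] using this
  · have := h2 (by simpa using h)
    rw [List.getD, List.getElem?_map, List.getElem?_eq_getElem h] at this
    simpa using this

-- pvNextState facts
lemma pvNext_latar_any (low : String) (st : PvSt) (h : pvIsLatar low = true) :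
    pvNextState st low = pvNextState PvSt.latar low := by simp [pvNextState, h]
lemma pvNext_start (low : String) (h : pvIsLatar low = false) :
    pvNextState PvSt.start low = PvSt.start := by simp [pvNextState, h]
lemma pvNext_latar_stay (low : String) (h : pvIsTujuan low = false) :
    pvNextState PvSt.latar low = PvSt.latar := by simp [pvNextState, h]
lemma pvNext_latar_tujuan (low : String) (h : pvIsTujuan low = true) :
    pvNextState PvSt.latar low = PvSt.tujuan := by simp [pvNextState, h]
lemma pvNext_tujuan_stay (low : String) (h1 : pvIsLatar low = false) (h2 : pvIsMetode low = false) :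
    pvNextState PvSt.tujuan low = PvSt.tujuan := by simp [pvNextState, h1, h2]
lemma pvNext_tujuan_metode (low : String) (h1 : pvIsLatar low = false) (h2 : pvIsMetode low = true) :
    pvNextState PvSt.tujuan low = PvSt.metode := by simp [pvNextState, h1, h2]
lemma pvNext_metode_stay (low : String) (h : pvIsLatar low = false) :
    pvNextState PvSt.metode low = PvSt.metode := by simp [pvNextState, h]

-- pvGo depends on the head only through pvNextState
lemma pvGo_congr (st1 st2 : PvSt) (s : String) (r : List String)
    (h : pvNextState st1 (PySem.Str.lower s) = pvNextState st2 (PySem.Str.lower s)) :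
    pvGo st1 (s :: r) = pvGo st2 (s :: r) := by simp [pvGo, h]

-- skip lemmas: a prefix without the boundary keyword stays in the current section
lemma pvGo_skip_start (pre rest : List String) (h : ∀ s ∈ pre, pvIsLatar (PySem.Str.lower s) = false) :
    pvGo PvSt.start (pre ++ rest) = pvGo PvSt.start rest := by
  induction pre with
  | nil => rfl
  | cons s r ih =>
    rw [List.cons_append, pvGo, pvNext_start _ (h s (by simp))]
    exact ih (fun x hx => h x (by simp [hx]))

lemma pvGo_skip_latar (pre rest : List String) (h : ∀ s ∈ pre, pvIsTujuan (PySem.Str.lower s) = false) :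
    pvGo PvSt.latar (pre ++ rest) =
      (pre ++ (pvGo PvSt.latar rest).1, (pvGo PvSt.latar rest).2.1, (pvGo PvSt.latar rest).2.2) := by
  induction pre with
  | nil => rfl
  | cons s r ih =>
    rw [List.cons_append, pvGo, pvNext_latar_stay _ (h s (by simp))]
    simp [ih (fun x hx => h x (by simp [hx]))]

lemma pvGo_skip_tujuan (pre rest : List String)
    (h : ∀ s ∈ pre, pvIsLatar (PySem.Str.lower s) = false ∧ pvIsMetode (PySem.Str.lower s) = false) :
    pvGo PvSt.tujuan (pre ++ rest) =
      ((pvGo PvSt.tujuan rest).1, pre ++ (pvGo PvSt.tujuan rest).2.1, (pvGo PvSt.tujuan rest).2.2) := by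
  induction pre with
  | nil => rfl
  | cons s r ih =>
    rw [List.cons_append, pvGo, pvNext_tujuan_stay _ (h s (by simp)).1 (h s (by simp)).2]
    simp [ih (fun x hx => h x (by simp [hx]))]

lemma pvGo_skip_metode (pre rest : List String) (h : ∀ s ∈ pre, pvIsLatar (PySem.Str.lower s) = false) :
    pvGo PvSt.metode (pre ++ rest) =
      ((pvGo PvSt.metode rest).1, (pvGo PvSt.metode rest).2.1, pre ++ (pvGo PvSt.metode rest).2.2) := by
  induction pre with
  | nil => rfl
  | cons s r ih =>
    rw [List.cons_append, pvGo, pvNext_metode_stay _ (h s (by simp))]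
    simp [ih (fun x hx => h x (by simp [hx]))]

-- boundary decomposition: drop j = (prefix up to k) ++ drop k
lemma pvDropSplit (ss : List String) (j k : Nat) (hjk : j ≤ k) :
    ss.drop j = (ss.drop j).take (k - j) ++ ss.drop k := by
  conv_lhs => rw [← List.take_append_drop (k - j) (ss.drop j)]
  rw [List.drop_drop]
  congr 2
  omega

lemma pvLoopB_go (ss : List String) (j : Nat) (st : PvSt) (l t m : List String) :
    pvLoopB ss (ss.map PySem.Str.lower) ss.length j st l t m =
      (l ++ (pvGo st (ss.drop j)).1, t ++ (pvGo st (ss.drop j)).2.1, m ++ (pvGo st (ss.drop j)).2.2) := by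
  fun_induction pvLoopB ss (ss.map PySem.Str.lower) ss.length j st l t m with
  | case1 j l t m hj ih =>
    rw [ih]
    obtain ⟨hge, hle, hpre, hhd⟩ := pvFind_facts ss pvIsLatar j
    have key : pvGo PvSt.start (ss.drop j) =
        pvGo PvSt.latar (ss.drop (pvFindB (ss.map PySem.Str.lower) pvIsLatar j)) := by
      conv_lhs => rw [pvDropSplit ss j _ hge]
      rw [pvGo_skip_start _ _ hpre]
      by_cases hk : pvFindB (ss.map PySem.Str.lower) pvIsLatar j < ss.length
      · rw [List.drop_eq_getElem_cons hk]
        exact pvGo_congr _ _ _ _ (pvNext_latar_any _ _ (hhd hk))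
      · rw [List.drop_eq_nil_of_le (by omega)]
        simp [pvGo]
    rw [key]
  | case2 j l t m hj k l' t' ih =>
    have hk_def : k = pvFindB (ss.map PySem.Str.lower) pvIsTujuan j := rfl
    have hl'_def : l' = l ++ PySem.List.slice ss (some (j : Int)) (some (k : Int)) := rfl
    have ht'_def : t' = if k < ss.length then t ++ [PySem.List.pyGetD ss (k : Int) ""] else t := rfl
    clear_value k l' t'
    subst hk_def hl'_def ht'_def
    rw [ih]
    obtain ⟨hge, hle, hpre, hhd⟩ := pvFind_facts ss pvIsTujuan j
    by_cases hk : pvFindB (ss.map PySem.Str.lower) pvIsTujuan j < ss.length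
    · have key : pvGo PvSt.latar (ss.drop j) =
          ((ss.drop j).take (pvFindB (ss.map PySem.Str.lower) pvIsTujuan j - j) ++
              (pvGo PvSt.tujuan (ss.drop (pvFindB (ss.map PySem.Str.lower) pvIsTujuan j + 1))).1,
            ss[pvFindB (ss.map PySem.Str.lower) pvIsTujuan j] ::
              (pvGo PvSt.tujuan (ss.drop (pvFindB (ss.map PySem.Str.lower) pvIsTujuan j + 1))).2.1,
            (pvGo PvSt.tujuan (ss.drop (pvFindB (ss.map PySem.Str.lower) pvIsTujuan j + 1))).2.2) := by
        conv_lhs => rw [pvDropSplit ss j _ hge]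
        rw [pvGo_skip_latar _ _ hpre, List.drop_eq_getElem_cons hk,
          pvGo, pvNext_latar_tujuan _ (hhd hk)]
      rw [key]
      simp [hk, PySem.List.slice_natCast, List.getD]
    · have hnil : ss.drop (pvFindB (ss.map PySem.Str.lower) pvIsTujuan j) = [] :=
        List.drop_eq_nil_of_le (by omega)
      have hnil' : ss.drop (pvFindB (ss.map PySem.Str.lower) pvIsTujuan j + 1) = [] :=
        List.drop_eq_nil_of_le (by omega)
      have key : pvGo PvSt.latar (ss.drop j) =
          ((ss.drop j).take (pvFindB (ss.map PySem.Str.lower) pvIsTujuan j - j), [], []) := by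
        conv_lhs => rw [pvDropSplit ss j _ hge]
        rw [pvGo_skip_latar _ _ hpre, hnil]
        simp [pvGo]
      rw [key, hnil']
      simp [hk, PySem.List.slice_natCast, pvGo]
  | case3 j l t m hj k t' hcond ih =>
    have hk_def : k = pvFindB (ss.map PySem.Str.lower) (fun lo => pvIsLatar lo || pvIsMetode lo) j := rfl
    have ht'_def : t' = t ++ PySem.List.slice ss (some (j : Int)) (some (k : Int)) := rfl
    clear_value k t'
    subst hk_def ht'_def
    rw [ih]
    obtain ⟨hge, hle, hpre, hhd⟩ :=
      pvFind_facts ss (fun lo => pvIsLatar lo || pvIsMetode lo) j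
    have hk : pvFindB (ss.map PySem.Str.lower) (fun lo => pvIsLatar lo || pvIsMetode lo) j < ss.length :=
      hcond.1
    have key : pvGo PvSt.tujuan (ss.drop j) =
        ((pvGo PvSt.latar (ss.drop (pvFindB (ss.map PySem.Str.lower) (fun lo => pvIsLatar lo || pvIsMetode lo) j))).1,
          (ss.drop j).take (pvFindB (ss.map PySem.Str.lower) (fun lo => pvIsLatar lo || pvIsMetode lo) j - j) ++
            (pvGo PvSt.latar (ss.drop (pvFindB (ss.map PySem.Str.lower) (fun lo => pvIsLatar lo || pvIsMetode lo) j))).2.1,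
          (pvGo PvSt.latar (ss.drop (pvFindB (ss.map PySem.Str.lower) (fun lo => pvIsLatar lo || pvIsMetode lo) j))).2.2) := by
      have hlat : pvIsLatar (PySem.Str.lower ss[pvFindB (ss.map PySem.Str.lower) (fun lo => pvIsLatar lo || pvIsMetode lo) j]) = true := by
        have := hcond.2
        rw [PySem.List.pyGetD_natCast, List.getD, List.getElem?_map,
          List.getElem?_eq_getElem hk] at this
        simpa using this
      conv_lhs => rw [pvDropSplit ss j _ hge]
      rw [pvGo_skip_tujuan _ _ (fun s hs => by
          have := hpre s hs
          simp only [Bool.or_eq_false_iff] at this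
          exact this)]
      rw [List.drop_eq_getElem_cons hk,
        pvGo_congr PvSt.tujuan PvSt.latar _ _ (pvNext_latar_any _ _ hlat)]
    rw [key]
    simp [PySem.List.slice_natCast]
  | case4 j l t m hj k t' hcond m' ih =>
    have hk_def : k = pvFindB (ss.map PySem.Str.lower) (fun lo => pvIsLatar lo || pvIsMetode lo) j := rfl
    have ht'_def : t' = t ++ PySem.List.slice ss (some (j : Int)) (some (k : Int)) := rfl
    have hm'_def : m' = if k < ss.length then m ++ [PySem.List.pyGetD ss (k : Int) ""] else m := rfl
    clear_value k t' m'
    subst hk_def ht'_def hm'_def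
    rw [ih]
    obtain ⟨hge, hle, hpre, hhd⟩ :=
      pvFind_facts ss (fun lo => pvIsLatar lo || pvIsMetode lo) j
    have hskip : ∀ s ∈ (ss.drop j).take (pvFindB (ss.map PySem.Str.lower) (fun lo => pvIsLatar lo || pvIsMetode lo) j - j),
        pvIsLatar (PySem.Str.lower s) = false ∧ pvIsMetode (PySem.Str.lower s) = false := fun s hs => by
      have := hpre s hs
      simp only [Bool.or_eq_false_iff] at this
      exact this
    by_cases hk : pvFindB (ss.map PySem.Str.lower) (fun lo => pvIsLatar lo || pvIsMetode lo) j < ss.length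
    · have hlat : pvIsLatar (PySem.Str.lower ss[pvFindB (ss.map PySem.Str.lower) (fun lo => pvIsLatar lo || pvIsMetode lo) j]) = false := by
        by_contra hc
        refine hcond ⟨hk, ?_⟩
        rw [PySem.List.pyGetD_natCast, List.getD, List.getElem?_map, List.getElem?_eq_getElem hk]
        simpa using Bool.of_not_eq_false hc
      have hmet : pvIsMetode (PySem.Str.lower ss[pvFindB (ss.map PySem.Str.lower) (fun lo => pvIsLatar lo || pvIsMetode lo) j]) = true := by
        have := hhd hk
        simp only [Bool.or_eq_true] at this
        rcases this with h | h
        · rw [hlat] at h; exact absurd h (by simp)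
        · exact h
      have key : pvGo PvSt.tujuan (ss.drop j) =
          ((pvGo PvSt.metode (ss.drop (pvFindB (ss.map PySem.Str.lower) (fun lo => pvIsLatar lo || pvIsMetode lo) j + 1))).1,
            (ss.drop j).take (pvFindB (ss.map PySem.Str.lower) (fun lo => pvIsLatar lo || pvIsMetode lo) j - j) ++
              (pvGo PvSt.metode (ss.drop (pvFindB (ss.map PySem.Str.lower) (fun lo => pvIsLatar lo || pvIsMetode lo) j + 1))).2.1,
            ss[pvFindB (ss.map PySem.Str.lower) (fun lo => pvIsLatar lo || pvIsMetode lo) j] ::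
              (pvGo PvSt.metode (ss.drop (pvFindB (ss.map PySem.Str.lower) (fun lo => pvIsLatar lo || pvIsMetode lo) j + 1))).2.2) := by
        conv_lhs => rw [pvDropSplit ss j _ hge]
        rw [pvGo_skip_tujuan _ _ hskip, List.drop_eq_getElem_cons hk,
          pvGo, pvNext_tujuan_metode _ hlat hmet]
      rw [key]
      simp [hk, PySem.List.slice_natCast, List.getD]
    · have hnil : ss.drop (pvFindB (ss.map PySem.Str.lower) (fun lo => pvIsLatar lo || pvIsMetode lo) j) = [] :=
        List.drop_eq_nil_of_le (by omega)
      have hnil' : ss.drop (pvFindB (ss.map PySem.Str.lower) (fun lo => pvIsLatar lo || pvIsMetode lo) j + 1) = [] :=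
        List.drop_eq_nil_of_le (by omega)
      have key : pvGo PvSt.tujuan (ss.drop j) =
          ([], (ss.drop j).take (pvFindB (ss.map PySem.Str.lower) (fun lo => pvIsLatar lo || pvIsMetode lo) j - j), []) := by
        conv_lhs => rw [pvDropSplit ss j _ hge]
        rw [pvGo_skip_tujuan _ _ hskip, hnil]
        simp [pvGo]
      rw [key, hnil']
      simp [hk, PySem.List.slice_natCast, pvGo]
  | case5 j l t m hj k m' ih =>
    have hk_def : k = pvFindB (ss.map PySem.Str.lower) pvIsLatar j := rfl
    have hm'_def : m' = m ++ PySem.List.slice ss (some (j : Int)) (some (k : Int)) := rfl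
    clear_value k m'
    subst hk_def hm'_def
    rw [ih]
    obtain ⟨hge, hle, hpre, hhd⟩ := pvFind_facts ss pvIsLatar j
    have key : pvGo PvSt.metode (ss.drop j) =
        ((pvGo PvSt.latar (ss.drop (pvFindB (ss.map PySem.Str.lower) pvIsLatar j))).1,
          (pvGo PvSt.latar (ss.drop (pvFindB (ss.map PySem.Str.lower) pvIsLatar j))).2.1,
          (ss.drop j).take (pvFindB (ss.map PySem.Str.lower) pvIsLatar j - j) ++
            (pvGo PvSt.latar (ss.drop (pvFindB (ss.map PySem.Str.lower) pvIsLatar j))).2.2) := by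
      conv_lhs => rw [pvDropSplit ss j _ hge]
      rw [pvGo_skip_metode _ _ hpre]
      by_cases hk : pvFindB (ss.map PySem.Str.lower) pvIsLatar j < ss.length
      · rw [List.drop_eq_getElem_cons hk,
          pvGo_congr PvSt.metode PvSt.latar _ _ (pvNext_latar_any _ _ (hhd hk))]
      · rw [List.drop_eq_nil_of_le (by omega)]
        simp [pvGo]
    rw [key]
    simp [PySem.List.slice_natCast]
  | case6 j st l t m hj =>
    have hnil : ss.drop j = [] := List.drop_eq_nil_of_le (by omega)
    rw [hnil]
    simp [pvGo]

lemma pvFileA_eq_pvFileB (sentences : List String) : pvFileA sentences = pvFileB sentences := by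
  cases sentences with
  | nil =>
    have h := pvLoopB_go [] 1 PvSt.start [] [] []
    simp only [pvGo, List.drop_nil, List.map_nil, List.length_nil, List.append_nil] at h
    simp [pvFileA, pvFileB, h, PySem.List.enumerate, PySem.List.slice, PySem.List.clampIdx]
  | cons s0 rest =>
    have hcongr : (PySem.List.enumerate rest 1).foldl pvStepA
        (((false, false, false) : Bool × Bool × Bool), (([s0], [], [], []) : List String × List String × List String × List String)) =
        (PySem.List.enumerate rest 1).foldl (fun acc p => pvStepA acc (1, p.2))
        ((false, false, false), ([s0], [], [], [])) := by
      refine PySem.List.foldl_congr_mem _ _ _ _ ?_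
      intro acc p hp
      rcases (PySem.List.mem_enumerate_iff _ _ _).1 hp with ⟨k, hk, rfl⟩
      exact pvStepA_ne_zero _ _ (by omega)
    have hmap : (PySem.List.enumerate rest 1).foldl (fun acc p => pvStepA acc (1, p.2))
        (((false, false, false) : Bool × Bool × Bool), (([s0], [], [], []) : List String × List String × List String × List String)) =
        rest.foldl (fun acc s => pvStepA acc (1, s)) ((false, false, false), ([s0], [], [], [])) := by
      conv_rhs => rw [← PySem.List.map_snd_enumerate rest 1]
      rw [List.foldl_map]
    have h0 : pvStepA ((false, false, false), ([], [], [], [])) (0, s0) =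
        ((false, false, false), ([s0], [], [], [])) := by
      simp [pvStepA]
    have hone : (0 : Int) + 1 = 1 := by norm_num
    have hst : pvStateOf (false, false, false) = PvSt.start := rfl
    have hdrop : (s0 :: rest).drop 1 = rest := rfl
    simp only [pvFileA, PySem.List.enumerate_cons, List.foldl_cons, h0, hone, hcongr, hmap,
      pvFoldA_eq, hst, pvFileB, pvLoopB_go, hdrop]
    simp [PySem.List.slice, PySem.List.clampIdx]

-- ===== VERDICT (by name: the statement is the Claim_ definition above) =====
theorem categorize_sentences_spec : Claim_equal_categorize_sentences := by
  intro st _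
  unfold Spec_categorize_sentences categorize_sentences categorize_sentences_alt
  simp [pvFileA_eq_pvFileB]
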